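-- pv_equiv track=rewrite | github.com/nagylzs/pysysinfo_influxdb | scripts/send_sysinfo_influx.py | _split_tags_and_fields
-- ===== SOURCE A (Python) =====
-- from typing import List, Dict, Set
--
-- def _split_tags_and_fields(values, tag_names: Set[str] = set([])):
--     tags = {}
--     fields = {}
--     for key, value in values.items():
--         if key in tag_names:
--             tags[key] = value
--         else:
--             fields[key] = value
--     return dict(fields=fields, tags=tags)
-- ===== SOURCE B (Python) =====
-- def _split_tags_and_fields(values, tag_names: set = set([])):
--     # Decomposition: partition the key list first, then populate each dict
--     # in its own comprehension pass (instead of one branching loop).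
--     keys = list(values)
--     tag_keys = [k for k in keys if k in tag_names]
--     field_keys = [k for k in keys if k not in tag_names]
--     tags = {k: values[k] for k in tag_keys}
--     fields = {k: values[k] for k in field_keys}
--     return dict(fields=fields, tags=tags)
-- ===== Notes on version B (the rewrite author's own statement) =====
-- stated objective: alternative
-- what changed: B partitions the key list into tag_keys/field_keys first and then builds each dict in its own comprehension pass, instead of A's single loop over items() with an if/else branch.
import Mathlib
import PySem

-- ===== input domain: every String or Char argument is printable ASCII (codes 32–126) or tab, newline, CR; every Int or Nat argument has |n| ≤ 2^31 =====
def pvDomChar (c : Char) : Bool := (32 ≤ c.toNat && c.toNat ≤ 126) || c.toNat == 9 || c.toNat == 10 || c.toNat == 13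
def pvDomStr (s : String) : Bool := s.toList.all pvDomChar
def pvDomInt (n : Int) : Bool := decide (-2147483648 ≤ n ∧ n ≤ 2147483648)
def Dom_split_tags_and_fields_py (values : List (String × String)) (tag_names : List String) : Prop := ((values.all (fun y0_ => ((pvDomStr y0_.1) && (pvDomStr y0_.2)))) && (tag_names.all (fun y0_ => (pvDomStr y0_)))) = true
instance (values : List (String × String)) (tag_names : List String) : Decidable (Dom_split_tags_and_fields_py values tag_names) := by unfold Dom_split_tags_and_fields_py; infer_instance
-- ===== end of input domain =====

-- B partitions the key list into tag_keys/field_keys first, then builds each dict in its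
-- own comprehension pass, instead of A's single branching loop (objective: alternative).


-- ===== PORT A =====
-- loop body: 'if key in tag_names: tags[key] = value else: fields[key] = value'
def pvStepA (tag_names : List String)
    (p : PySem.Dict String String × PySem.Dict String String) (kv : String × String) :
    PySem.Dict String String × PySem.Dict String String :=
  if tag_names.contains kv.1 then (p.1.insert kv.1 kv.2, p.2) else (p.1, p.2.insert kv.1 kv.2)

def split_tags_and_fields_py (values : List (String × String)) (tag_names : List String) : List (String × List (String × String)) :=
  let r := values.foldl (pvStepA tag_names) (PySem.Dict.empty, PySem.Dict.empty)
  [("fields", r.2.items), ("tags", r.1.items)]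

-- ===== PORT B =====
def split_tags_and_fields_py_alt (values : List (String × String)) (tag_names : List String) : List (String × List (String × String)) :=
  let d : PySem.Dict String String := PySem.Dict.mk values   -- the dict argument
  let keys := d.keys                                          -- keys = list(values)
  let tag_keys := keys.filter (fun k => tag_names.contains k)
  let field_keys := keys.filter (fun k => !tag_names.contains k)
  -- 'values[k]': k always comes from keys, so the KeyError default is never used
  let tags := tag_keys.map (fun k => (k, d.getD k ""))
  let fields := field_keys.map (fun k => (k, d.getD k ""))
  [("fields", fields), ("tags", tags)]

-- ===== PRECONDITION & SPEC =====
-- Pre_ excludes association lists with duplicate keys: A's 'values' parameter is a Python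
-- dict, which can never carry duplicate keys, so nothing A accepts is excluded.
def Pre_split_tags_and_fields_py (values : List (String × String)) (tag_names : List String) : Prop :=
  (values.map Prod.fst).Nodup
instance (values : List (String × String)) (tag_names : List String) : Decidable (Pre_split_tags_and_fields_py values tag_names) := by unfold Pre_split_tags_and_fields_py; infer_instance

def pvWitness_split_tags_and_fields_py : (List (String × String)) × List String :=
  ([("host", "h1"), ("cpu", "0.5")], ["host"])

def Spec_split_tags_and_fields_py (values : List (String × String)) (tag_names : List String) (out : List (String × List (String × String))) : Prop := out = split_tags_and_fields_py_alt values tag_names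
instance (values : List (String × String)) (tag_names : List String) (out : List (String × List (String × String))) : Decidable (Spec_split_tags_and_fields_py values tag_names out) := by unfold Spec_split_tags_and_fields_py; infer_instance

-- ===== CLAIM (what is proved, stated in full; the proofs are below) =====
def Claim_equal_split_tags_and_fields_py : Prop := ∀ (values : List (String × String)) (tag_names : List String), Dom_split_tags_and_fields_py values tag_names → Pre_split_tags_and_fields_py values tag_names → Spec_split_tags_and_fields_py values tag_names (split_tags_and_fields_py values tag_names)

-- ===== LEMMAS AND PROOFS =====

-- A's loop, on distinct keys fresh for both accumulators, appends the two filters.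
lemma pv_foldA (tag_names : List String) :
    ∀ (l : List (String × String)) (t f : PySem.Dict String String),
      (l.map Prod.fst).Nodup →
      (∀ kv ∈ l, t.contains kv.1 = false) →
      (∀ kv ∈ l, f.contains kv.1 = false) →
      (l.foldl (pvStepA tag_names) (t, f)).1.items
          = t.items ++ l.filter (fun kv => tag_names.contains kv.1)
        ∧ (l.foldl (pvStepA tag_names) (t, f)).2.items
          = f.items ++ l.filter (fun kv => !tag_names.contains kv.1) := by
  intro l
  induction l with
  | nil => intro t f _ _ _; simp
  | cons kv rest ih =>
      intro t f hnd ht hf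
      have hndr : (rest.map Prod.fst).Nodup := (List.nodup_cons.mp (by simpa using hnd)).2
      have hhead : kv.1 ∉ rest.map Prod.fst := (List.nodup_cons.mp (by simpa using hnd)).1
      have hne : ∀ kv' ∈ rest, kv'.1 ≠ kv.1 := by
        intro kv' h hmem
        exact hhead (hmem ▸ List.mem_map_of_mem h)
      by_cases hc : kv.1 ∈ tag_names
      · have step : pvStepA tag_names (t, f) kv = (t.insert kv.1 kv.2, f) := by
          simp [pvStepA, hc]
        have ih' := ih (t.insert kv.1 kv.2) f hndr
          (by intro kv' h
              rw [PySem.Dict.contains_insert]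
              simp [hne kv' h, ht kv' (List.mem_cons_of_mem _ h)])
          (by intro kv' h; exact hf kv' (List.mem_cons_of_mem _ h))
        have hins : (t.insert kv.1 kv.2).items = t.items ++ [(kv.1, kv.2)] :=
          PySem.Dict.items_insert_of_not_contains _ _ (ht kv (List.mem_cons_self ..))
        simp only [List.foldl_cons, step]
        refine ⟨?_, ?_⟩
        · rw [ih'.1, hins, List.filter_cons]
          simp [hc]
        · rw [ih'.2, List.filter_cons]
          simp [hc]
      · have step : pvStepA tag_names (t, f) kv = (t, f.insert kv.1 kv.2) := by
          simp [pvStepA, hc]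
        have ih' := ih t (f.insert kv.1 kv.2) hndr
          (by intro kv' h; exact ht kv' (List.mem_cons_of_mem _ h))
          (by intro kv' h
              rw [PySem.Dict.contains_insert]
              simp [hne kv' h, hf kv' (List.mem_cons_of_mem _ h)])
        have hins : (f.insert kv.1 kv.2).items = f.items ++ [(kv.1, kv.2)] :=
          PySem.Dict.items_insert_of_not_contains _ _ (hf kv (List.mem_cons_self ..))
        simp only [List.foldl_cons, step]
        refine ⟨?_, ?_⟩
        · rw [ih'.1, List.filter_cons]
          simp [hc]
        · rw [ih'.2, hins, List.filter_cons]
          simp [hc]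

-- B's filter-keys-then-look-up pass equals filtering the pairs directly.
lemma pv_mapfilter (d : PySem.Dict String String) :
    ∀ (l : List (String × String)), (∀ kv ∈ l, d.getD kv.1 "" = kv.2) → ∀ (p : String → Bool),
      ((l.map Prod.fst).filter p).map (fun k => (k, d.getD k "")) = l.filter (fun kv => p kv.1) := by
  intro l
  induction l with
  | nil => intro _ p; simp
  | cons kv rest ih =>
      intro h p
      have hrest := ih (fun kv' h' => h kv' (List.mem_cons_of_mem _ h')) p
      by_cases hp : p kv.1
      · simp [List.filter_cons, hp, hrest, h kv (List.mem_cons_self ..)]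
      · simp [List.filter_cons, hp, hrest]

-- ===== VERDICT (by name: the statement is the Claim_ definition above) =====
theorem split_tags_and_fields_py_spec : Claim_equal_split_tags_and_fields_py := by
  intro values tag_names _ hpre
  unfold Spec_split_tags_and_fields_py split_tags_and_fields_py split_tags_and_fields_py_alt
  have hnd : ((PySem.Dict.mk values).keys).Nodup := by
    simpa [PySem.Dict.keys] using hpre
  have hget : ∀ kv ∈ values, (PySem.Dict.mk values).getD kv.1 "" = kv.2 := by
    intro kv hmem
    exact PySem.Dict.getD_of_mem_items _ (by simpa using hmem) hnd _
  have hA := pv_foldA tag_names values PySem.Dict.empty PySem.Dict.empty hpre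
    (by intro kv _; simp) (by intro kv _; simp)
  have hB1 := pv_mapfilter (PySem.Dict.mk values) values hget (fun k => tag_names.contains k)
  have hB2 := pv_mapfilter (PySem.Dict.mk values) values hget (fun k => !tag_names.contains k)
  have hkeys : (PySem.Dict.mk values).keys = values.map Prod.fst := rfl
  dsimp only
  rw [hA.1, hA.2, hkeys, hB1, hB2]
  simp [PySem.Dict.empty]
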